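-- pv_equiv track=rewrite | github.com/Bogtaran/Codewars | Encrypt this.py | encrypt_this
-- ===== SOURCE A (Python) =====
-- def encrypt_this(text):
--     text = text.split()
--     new_t = []
--     for i in text:
--         if len(i) == 1:
--             new_t.append(str(ord(i[0])))
--         elif len(i) == 2:
--             new_t.append(str(ord(i[0])) + i[1])
--         else:
--             new_t.append(str(ord(i[0])) + i[-1] + i[2:-1] + i[1])
--
--     return ' '.join(new_t)
-- ===== SOURCE B (Python) =====
-- def _scramble(buf):
--     head = str(ord(buf[0]))
--     tail = buf[1:]
--     if len(tail) < 2: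
--         return head + ''.join(tail)
--     return head + tail[-1] + ''.join(tail[1:-1]) + tail[0]
--
--
-- def encrypt_this(text):
--     pieces = []
--     buf = []
--     for c in text:
--         if c.isspace():
--             if buf:
--                 pieces.append(_scramble(buf))
--                 buf = []
--         else:
--             buf.append(c)
--     if buf:
--         pieces.append(_scramble(buf))
--     return ' '.join(pieces)
-- ===== Notes on version B (the rewrite author's own statement) =====
-- stated objective: alternative
-- what changed: Replaces A's staged split()/per-word 3-branch loop/join pipeline by a single character-level scan of the raw text: a state machine buffers word characters, flushes each word on whitespace (and once after the loop) through a head/tail scramble helper with one guard, and no split() is performed at all.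
import Mathlib
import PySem

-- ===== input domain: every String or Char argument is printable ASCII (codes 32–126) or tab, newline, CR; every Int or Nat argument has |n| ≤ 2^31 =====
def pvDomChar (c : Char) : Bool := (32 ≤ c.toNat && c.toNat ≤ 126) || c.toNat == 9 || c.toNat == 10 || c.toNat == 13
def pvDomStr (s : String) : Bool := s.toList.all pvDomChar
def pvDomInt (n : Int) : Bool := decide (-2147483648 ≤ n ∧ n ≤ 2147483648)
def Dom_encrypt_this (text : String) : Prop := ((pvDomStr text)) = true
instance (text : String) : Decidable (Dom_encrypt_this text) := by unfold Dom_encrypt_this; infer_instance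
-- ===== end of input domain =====

-- B replaces A's split/branch/join staging by a single char-level scan of the raw text (buffer words, flush through a head/tail scramble helper); objective: alternative decomposition, same cost.


-- ===== PORT A =====
-- one word of A's loop body: the three length branches
def encWordA (i : List Char) : List Char :=
  if i.length = 1 then
    PySem.Int.toChars ((PySem.List.pyGetD i 0 ' ').toNat : Int)
  else if i.length = 2 then
    PySem.Int.toChars ((PySem.List.pyGetD i 0 ' ').toNat : Int) ++ [PySem.List.pyGetD i 1 ' ']
  else
    PySem.Int.toChars ((PySem.List.pyGetD i 0 ' ').toNat : Int) ++ [PySem.List.pyGetD i (-1) ' ']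
      ++ PySem.List.slice i (some 2) (some (-1)) ++ [PySem.List.pyGetD i 1 ' ']

def encrypt_this (text : String) : String :=
  let words := PySem.Chars.split₀ text.toList
  let new_t := words.foldl (fun acc i => acc ++ [encWordA i]) []
  String.ofList (PySem.Chars.join [' '] new_t)

-- ===== PORT B =====
-- Source B's _scramble: head = str(ord(buf[0])), tail = buf[1:], one guard on len(tail)
def scramble (buf : List Char) : List Char :=
  let head := PySem.Int.toChars ((PySem.List.pyGetD buf 0 ' ').toNat : Int)
  let tail := PySem.List.slice buf (some 1) none
  if tail.length < 2 then
    head ++ PySem.Chars.join [] (tail.map (fun c => [c]))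
  else
    head ++ [PySem.List.pyGetD tail (-1) ' ']
      ++ PySem.Chars.join [] ((PySem.List.slice tail (some 1) (some (-1))).map (fun c => [c]))
      ++ [PySem.List.pyGetD tail 0 ' ']

-- Source B's char loop: state (pieces, buf); whitespace flushes buf, other chars extend it; final flush after the loop
def scanB : List Char → List (List Char) → List Char → List (List Char)
  | [], pieces, buf => if buf.isEmpty then pieces else pieces ++ [scramble buf]
  | c :: rest, pieces, buf =>
    if PySem.Chars.isspace c then
      if buf.isEmpty then scanB rest pieces [] else scanB rest (pieces ++ [scramble buf]) []
    else scanB rest pieces (buf ++ [c])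

def encrypt_this_alt (text : String) : String :=
  String.ofList (PySem.Chars.join [' '] (scanB text.toList [] []))

-- ===== PRECONDITION & SPEC =====
def Spec_encrypt_this (text : String) (out : String) : Prop := out = encrypt_this_alt text
instance (text : String) (out : String) : Decidable (Spec_encrypt_this text out) := by unfold Spec_encrypt_this; infer_instance

-- ===== CLAIM (what is proved, stated in full; the proofs are below) =====
def Claim_equal_encrypt_this : Prop := ∀ (text : String), Dom_encrypt_this text → Spec_encrypt_this text (encrypt_this text)

-- ===== LEMMAS AND PROOFS =====

-- every word produced by split() is nonempty
theorem split₀_go_ne_nil (s cur : List Char) (acc : List (List Char))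
    (h : ∀ w ∈ acc, w ≠ []) : ∀ w ∈ PySem.Chars.split₀.go s cur acc, w ≠ [] := by
  induction s generalizing cur acc with
  | nil =>
    intro w hw
    unfold PySem.Chars.split₀.go at hw
    split_ifs at hw with hc
    · exact h w (List.mem_reverse.mp hw)
    · rw [List.mem_reverse, List.mem_cons] at hw
      rcases hw with hw | hw
      · subst hw; simp [List.isEmpty_iff] at hc; simp [hc]
      · exact h w hw
  | cons c rest ih =>
    intro w hw
    unfold PySem.Chars.split₀.go at hw
    split_ifs at hw with h1 h2
    · exact ih [] acc h w hw
    · refine ih [] (cur.reverse :: acc) ?_ w hw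
      intro v hv
      rcases List.mem_cons.mp hv with hv | hv
      · subst hv; simp [List.isEmpty_iff] at h2; simp [h2]
      · exact h v hv
    · exact ih (c :: cur) acc h w hw

theorem split₀_ne_nil (s : List Char) : ∀ w ∈ PySem.Chars.split₀ s, w ≠ [] := by
  intro w hw
  exact split₀_go_ne_nil s [] [] (by simp) w hw

-- B's scan, started in a state mirroring split₀.go's, produces the scrambles of the split words
theorem scanB_eq_go (s : List Char) (cur : List Char) (acc : List (List Char)) :
    scanB s (acc.reverse.map scramble) cur.reverse
      = (PySem.Chars.split₀.go s cur acc).map scramble := by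
  induction s generalizing cur acc with
  | nil =>
    unfold scanB PySem.Chars.split₀.go
    by_cases hc : cur = []
    · subst hc; simp
    · rw [if_neg (by simp [List.isEmpty_iff, hc]), if_neg (by simp [List.isEmpty_iff, hc])]
      simp
  | cons c rest ih =>
    unfold scanB PySem.Chars.split₀.go
    by_cases hs : PySem.Chars.isspace c = true
    · rw [if_pos hs, if_pos hs]
      by_cases hc : cur = []
      · subst hc
        rw [if_pos (by simp), if_pos (by simp)]
        exact ih [] acc
      · rw [if_neg (by simp [List.isEmpty_iff, hc]), if_neg (by simp [List.isEmpty_iff, hc])]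
        have := ih [] (cur.reverse :: acc)
        simpa using this
    · rw [if_neg hs, if_neg hs]
      have := ih (c :: cur) acc
      simpa using this

theorem scanB_eq_split (s : List Char) :
    scanB s [] [] = (PySem.Chars.split₀ s).map scramble := by
  have := scanB_eq_go s [] []
  simpa [PySem.Chars.split₀] using this

-- A's foldl builds exactly the map of its word transform
theorem foldl_append_map (l : List (List Char)) (acc : List (List Char)) :
    l.foldl (fun a i => a ++ [encWordA i]) acc = acc ++ l.map encWordA := by
  induction l generalizing acc with
  | nil => simp
  | cons x t ih => simp [List.foldl_cons, ih]

theorem pyGetD_neg_one_cons_append {α : Type} (x : α) (xs : List α) (w d : α) :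
    PySem.List.pyGetD (x :: (xs ++ [w])) (-1) d = w := by
  simp [PySem.List.pyGetD, PySem.List.pyGet?, PySem.List.pyIdx?]

theorem pyGetD_neg_one_cons_cons_append {α : Type} (x y : α) (xs : List α) (w d : α) :
    PySem.List.pyGetD (x :: y :: (xs ++ [w])) (-1) d = w := by
  simp [PySem.List.pyGetD, PySem.List.pyGet?, PySem.List.pyIdx?]
  rw [if_pos (by omega)]
  simp

theorem slice_one_none_cons {α : Type} (x : α) (xs : List α) :
    PySem.List.slice (x :: xs) (some 1) none = xs := by
  simp [PySem.List.slice, PySem.List.clampIdx]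

theorem slice_one_neg_one_cons_append {α : Type} (x : α) (xs : List α) (w : α) :
    PySem.List.slice (x :: (xs ++ [w])) (some 1) (some (-1)) = xs := by
  simp [PySem.List.slice, PySem.List.clampIdx]
  have h2 : (if ((xs.length : Int) + 1) < 0 then (0:Nat) else xs.length + 1) - 1 = xs.length := by
    split_ifs <;> omega
  rw [h2]
  simp

theorem slice_two_neg_one_cons_cons_append {α : Type} (x y : α) (xs : List α) (w : α) :
    PySem.List.slice (x :: y :: (xs ++ [w])) (some 2) (some (-1)) = xs := by
  simp [PySem.List.slice, PySem.List.clampIdx]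
  have h2 : (if ((xs.length : Int) + 1 + 1) < 0 then (0:Nat) else ((xs.length : Int) + 1 + 1).toNat) - 2 = xs.length := by
    split_ifs <;> omega
  rw [h2]
  simp

-- per-word agreement on nonempty words
theorem encWord_eq (w : List Char) (hw : w ≠ []) : encWordA w = scramble w := by
  match w, hw with
  | [a], _ =>
    simp [encWordA, scramble, slice_one_none_cons, PySem.List.pyGetD, PySem.List.pyGet?,
      PySem.List.pyIdx?, PySem.Chars.join, List.intercalate]
  | [a, b], _ =>
    simp [encWordA, scramble, slice_one_none_cons, PySem.List.pyGetD, PySem.List.pyGet?,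
      PySem.List.pyIdx?, PySem.Chars.join, List.intercalate]
  | a :: b :: c :: t, _ =>
    have hdec : a :: b :: c :: t = (a :: b :: (c :: t).dropLast) ++ [(c :: t).getLast (by simp)] := by
      simp [List.dropLast_concat_getLast]
    rw [hdec]
    generalize (c :: t).dropLast = mid
    generalize (c :: t).getLast (by simp) = z
    simp only [encWordA, scramble, List.cons_append]
    rw [if_neg (by simp), if_neg (by simp)]
    rw [slice_one_none_cons]
    rw [if_neg (by simp)]
    rw [pyGetD_neg_one_cons_append, pyGetD_neg_one_cons_cons_append]
    rw [slice_one_neg_one_cons_append, slice_two_neg_one_cons_cons_append]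
    have hg0 : PySem.List.pyGetD (b :: (mid ++ [z])) 0 ' ' = b := by
      simp [PySem.List.pyGetD, PySem.List.pyGet?, PySem.List.pyIdx?]
      rw [if_pos (by omega : (0:Int) ≤ ↑mid.length + 1)]
      simp
    have hg1 : PySem.List.pyGetD (a :: b :: (mid ++ [z])) 1 ' ' = b := by
      simp [PySem.List.pyGetD, PySem.List.pyGet?, PySem.List.pyIdx?]
      rw [if_pos (by omega : (0:Int) ≤ ↑mid.length + 1)]
      simp
    rw [hg0, hg1, PySem.Chars.join_nil_singletons]

-- ===== VERDICT (by name: the statement is the Claim_ definition above) =====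
theorem encrypt_this_spec : Claim_equal_encrypt_this := by
  intro text _
  have h : (PySem.Chars.split₀ text.toList).map encWordA
      = (PySem.Chars.split₀ text.toList).map scramble :=
    List.map_congr_left (fun w hw => encWord_eq w (split₀_ne_nil _ w hw))
  simp only [Spec_encrypt_this, encrypt_this, encrypt_this_alt, scanB_eq_split,
    foldl_append_map, List.nil_append, h]
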